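-- pv_equiv track=rewrite | github.com/gpu-mode/kernelboard | ranking_worker.py | _group_by_leaderboard
-- ===== SOURCE A (Python) =====
-- def _group_by_leaderboard(entries):
--     """Group ranking entries by leaderboard_id. Returns {lb_id: {rank: entry}}."""
--     grouped = {}
--     for entry in entries:
--         lb_id = entry["leaderboard_id"]
--         rank = entry["rank"]
--         if lb_id not in grouped:
--             grouped[lb_id] = {}
--         grouped[lb_id][rank] = entry
--     return grouped
-- ===== SOURCE B (Python) =====
-- def _group_by_leaderboard(entries):
--     """Group ranking entries by leaderboard_id. Returns {lb_id: {rank: entry}}."""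
--     lb_ids = list(dict.fromkeys(e["leaderboard_id"] for e in entries))
--     return {
--         lb_id: {e["rank"]: e for e in entries if e["leaderboard_id"] == lb_id}
--         for lb_id in lb_ids
--     }
-- ===== Notes on version B (the rewrite author's own statement) =====
-- stated objective: alternative
-- what changed: Replaces A's single-pass dict-of-dicts accumulation with a two-phase plan: an ordered dedup of the leaderboard ids (dict.fromkeys), then one inner {rank: entry} comprehension per id over the matching entries.
import Mathlib
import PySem

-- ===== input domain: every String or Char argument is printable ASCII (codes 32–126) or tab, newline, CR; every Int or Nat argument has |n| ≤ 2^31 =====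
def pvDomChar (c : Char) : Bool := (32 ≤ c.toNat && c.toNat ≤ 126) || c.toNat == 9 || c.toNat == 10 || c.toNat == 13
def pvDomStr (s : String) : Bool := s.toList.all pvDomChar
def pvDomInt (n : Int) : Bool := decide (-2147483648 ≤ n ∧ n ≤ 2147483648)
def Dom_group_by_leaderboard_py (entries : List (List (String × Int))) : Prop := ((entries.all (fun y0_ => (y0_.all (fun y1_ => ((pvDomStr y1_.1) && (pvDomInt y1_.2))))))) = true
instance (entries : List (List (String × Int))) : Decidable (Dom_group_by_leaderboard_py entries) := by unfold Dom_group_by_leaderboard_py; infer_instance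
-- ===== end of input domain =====

-- B replaces A's single-pass dict-of-dicts accumulation by a two-phase plan (ordered-dedup of the
-- leaderboard ids, then one inner rank-dict comprehension per id); objective: alternative, not faster.

-- shared helper: entry["k"] on a Python dict (assoc list, first-match lookup); the 0 default is never
-- reached inside Pre_ (Python raises KeyError there, which Pre_ excludes)
def pvEntryGet (e : List (String × Int)) (k : String) : Int := (PySem.Dict.mk e).getD k 0

-- ===== PORT A =====
-- loop body of A: if lb_id not in grouped: grouped[lb_id] = {}; grouped[lb_id][rank] = entry
def pvStepA (grouped : PySem.Dict Int (PySem.Dict Int (List (String × Int))))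
    (entry : List (String × Int)) : PySem.Dict Int (PySem.Dict Int (List (String × Int))) :=
  let lb_id := pvEntryGet entry "leaderboard_id"
  let rank := pvEntryGet entry "rank"
  let g := if grouped.contains lb_id then grouped else grouped.insert lb_id PySem.Dict.empty
  g.modify lb_id PySem.Dict.empty (fun inner => inner.insert rank entry)

def group_by_leaderboard_py (entries : List (List (String × Int))) :
    List (Int × List (Int × List (String × Int))) :=
  ((entries.foldl pvStepA PySem.Dict.empty).items).map (fun p => (p.1, p.2.items))

-- ===== PORT B =====
-- {e["rank"]: e for e in entries if e["leaderboard_id"] == lb_id}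
def pvInnerB (entries : List (List (String × Int))) (lb_id : Int) :
    PySem.Dict Int (List (String × Int)) :=
  (entries.filter (fun e => pvEntryGet e "leaderboard_id" == lb_id)).foldl
    (fun d e => d.insert (pvEntryGet e "rank") e) PySem.Dict.empty

def group_by_leaderboard_py_alt (entries : List (List (String × Int))) :
    List (Int × List (Int × List (String × Int))) :=
  let lb_ids := PySem.List.dedup (entries.map (fun e => pvEntryGet e "leaderboard_id"))
  ((lb_ids.foldl (fun d lb_id => d.insert lb_id (pvInnerB entries lb_id))
      PySem.Dict.empty).items).map (fun p => (p.1, p.2.items))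

-- ===== PRECONDITION & SPEC =====
-- Pre_ excludes exactly the inputs on which Python A raises KeyError: an entry missing the
-- "leaderboard_id" or "rank" key.
def Pre_group_by_leaderboard_py (entries : List (List (String × Int))) : Prop :=
  ∀ e ∈ entries, ("leaderboard_id" ∈ e.map Prod.fst) ∧ ("rank" ∈ e.map Prod.fst)
instance (entries : List (List (String × Int))) : Decidable (Pre_group_by_leaderboard_py entries) := by
  unfold Pre_group_by_leaderboard_py; infer_instance

def pvWitness_group_by_leaderboard_py : (List (List (String × Int))) :=
  [[("leaderboard_id", 1), ("rank", 2)], [("leaderboard_id", 1), ("rank", 1)]]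

def Spec_group_by_leaderboard_py (entries : List (List (String × Int))) (out : List (Int × List (Int × List (String × Int)))) : Prop := out = group_by_leaderboard_py_alt entries
instance (entries : List (List (String × Int))) (out : List (Int × List (Int × List (String × Int)))) : Decidable (Spec_group_by_leaderboard_py entries out) := by unfold Spec_group_by_leaderboard_py; infer_instance

-- ===== CLAIM (what is proved, stated in full; the proofs are below) =====
def Claim_equal_group_by_leaderboard_py : Prop := ∀ (entries : List (List (String × Int))), Dom_group_by_leaderboard_py entries → Pre_group_by_leaderboard_py entries → Spec_group_by_leaderboard_py entries (group_by_leaderboard_py entries)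

-- ===== LEMMAS AND PROOFS =====

theorem getD_stepA (d : PySem.Dict Int (PySem.Dict Int (List (String × Int))))
    (e : List (String × Int)) (lb : Int) :
    (pvStepA d e).getD lb PySem.Dict.empty =
      if lb = pvEntryGet e "leaderboard_id" then
        (d.getD (pvEntryGet e "leaderboard_id") PySem.Dict.empty).insert (pvEntryGet e "rank") e
      else d.getD lb PySem.Dict.empty := by
  unfold pvStepA
  by_cases hc : d.contains (pvEntryGet e "leaderboard_id")
  · simp [hc, PySem.Dict.getD_modify]
  · simp only [Bool.not_eq_true] at hc
    simp only [PySem.Dict.getD_modify, PySem.Dict.getD_insert,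
      PySem.Dict.getD_of_not_contains d _ hc, hc, if_false, Bool.false_eq_true]
    split_ifs <;> rfl

theorem keys_stepA (d : PySem.Dict Int (PySem.Dict Int (List (String × Int))))
    (e : List (String × Int)) :
    (pvStepA d e).keys = PySem.Set.add d.keys (pvEntryGet e "leaderboard_id") := by
  unfold pvStepA
  by_cases hc : d.contains (pvEntryGet e "leaderboard_id")
  · rw [PySem.Set.add_eq_ite, if_pos ((PySem.Dict.contains_iff_mem_keys d _).mp hc)]
    simp [hc, PySem.Dict.keys_modify, PySem.Dict.keys_insert_of_contains _ _ hc]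
  · simp only [Bool.not_eq_true] at hc
    rw [PySem.Set.add_eq_ite,
      if_neg (fun h => by simp [(PySem.Dict.contains_iff_mem_keys d _).mpr h] at hc)]
    simp [hc, PySem.Dict.keys_modify, PySem.Dict.keys_insert_of_not_contains _ _ hc,
      PySem.Dict.keys_insert_of_contains _ _ (PySem.Dict.contains_insert_self _ _ _)]

theorem foldA_keys (l : List (List (String × Int)))
    (d : PySem.Dict Int (PySem.Dict Int (List (String × Int)))) :
    (l.foldl pvStepA d).keys =
      PySem.Set.update d.keys (l.map (fun e => pvEntryGet e "leaderboard_id")) := by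
  rw [PySem.Set.update_map_eq_foldl_add]
  induction l generalizing d with
  | nil => rfl
  | cons e l ih => simp only [List.foldl_cons, ih (pvStepA d e), keys_stepA]

theorem foldA_getD (l : List (List (String × Int)))
    (d : PySem.Dict Int (PySem.Dict Int (List (String × Int)))) (lb : Int) :
    (l.foldl pvStepA d).getD lb PySem.Dict.empty =
      (l.filter (fun e => pvEntryGet e "leaderboard_id" == lb)).foldl
        (fun dd e => dd.insert (pvEntryGet e "rank") e) (d.getD lb PySem.Dict.empty) := by
  induction l generalizing d with
  | nil => rfl
  | cons e l ih =>
    rw [List.foldl_cons, ih (pvStepA d e), List.filter_cons]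
    by_cases h : pvEntryGet e "leaderboard_id" = lb
    · simp [h, getD_stepA]
    · simp [h, getD_stepA, Ne.symm h, beq_iff_eq]

theorem ports_agree (entries : List (List (String × Int))) :
    group_by_leaderboard_py entries = group_by_leaderboard_py_alt entries := by
  simp only [group_by_leaderboard_py, group_by_leaderboard_py_alt]
  have hkeys : (entries.foldl pvStepA PySem.Dict.empty).keys =
      PySem.List.dedup (entries.map (fun e => pvEntryGet e "leaderboard_id")) := by
    rw [foldA_keys, PySem.List.dedup_eq_ofList]
    exact PySem.Set.update_nil_left _
  have hnd : (entries.foldl pvStepA PySem.Dict.empty).keys.Nodup := by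
    rw [hkeys, PySem.List.dedup_eq_ofList]; exact PySem.Set.nodup_ofList _
  rw [PySem.Dict.items_eq_map_keys _ hnd PySem.Dict.empty, hkeys,
    PySem.Dict.items_foldl_insert_fresh _ (fun lb => lb) _ PySem.Dict.empty
      (fun a _ => PySem.Dict.contains_empty a)
      (by rw [List.map_id_fun', PySem.List.dedup_eq_ofList]; exact PySem.Set.nodup_ofList _)]
  have he : (PySem.Dict.empty : PySem.Dict Int (PySem.Dict Int (List (String × Int)))).items = [] := rfl
  rw [he, List.nil_append, List.map_map, List.map_map]
  refine List.map_congr_left (fun lb _ => ?_)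
  simp only [Function.comp]
  rw [foldA_getD, PySem.Dict.getD_empty]
  rfl

-- ===== VERDICT (by name: the statement is the Claim_ definition above) =====
theorem group_by_leaderboard_py_spec : Claim_equal_group_by_leaderboard_py := by
  intro entries _ _
  unfold Spec_group_by_leaderboard_py
  exact ports_agree entries
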